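-- pv_equiv track=rewrite | github.com/HIVDiversity/HIVDiversity.github.io | webwidgets/fasta2standard.py | amalgamate_optional_fields
-- ===== SOURCE A (Python) =====
-- def amalgamate_optional_fields(text: str, field_delim: str, subfield_delim: str) -> str:
--     """
--     Amalgamate repeated optional fields in a transformed string.
--     Example: "_e-05_e-07" becomes "_e-05-07"
--
--     Args:
--         text: The transformed text
--         field_delim: Field delimiter
--         subfield_delim: Subfield delimiter
--
--     Returns:
--         Text with repeated optional fields amalgamated
--     """
--     if not text:
--         return text
--
--     valid_flags = ['a', 'f', 'm', 'w', 'o', 's', 'p', 'e', 'r']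
--     fields = text.split(field_delim)
--     grouped_fields = {}  # flag -> list of values
--     result_fields = []
--
--     for field in fields:
--         if not field:
--             # Empty field, keep as is
--             result_fields.append(field)
--             continue
--
--         # Check if this is an optional field (starts with flag-)
--         is_optional = False
--         flag = None
--         value = None
--
--         for f in valid_flags:
--             if field.startswith(f + subfield_delim):
--                 is_optional = True
--                 flag = f
--                 value = field[len(f) + len(subfield_delim):]
--                 break
--
--         if is_optional:
--             # Group this optional field
--             if flag not in grouped_fields:
--                 grouped_fields[flag] = []
--             grouped_fields[flag].append(value)
--         else:
--             # Non-optional field - flush any grouped optional fields before this one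
--             if grouped_fields:
--                 for f, values in grouped_fields.items():
--                     amalgamated = f + subfield_delim + subfield_delim.join(values)
--                     result_fields.append(amalgamated)
--                 grouped_fields.clear()
--             result_fields.append(field)
--
--     # Flush any remaining grouped optional fields at the end
--     if grouped_fields:
--         for f, values in grouped_fields.items():
--             amalgamated = f + subfield_delim + subfield_delim.join(values)
--             result_fields.append(amalgamated)
--
--     return field_delim.join(result_fields)
-- ===== SOURCE B (Python) =====
-- def amalgamate_optional_fields(text: str, field_delim: str, subfield_delim: str) -> str:
--     """Segment-based re-implementation: tokenize, cut the token list at non-empty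
--     literal (barrier) fields, and render each barrier-free segment independently
--     by filtering (empties first, then per-flag value gathering in first-appearance
--     order). No running group state is carried across the scan."""
--     if not text:
--         return text
--
--     valid_flags = ['a', 'f', 'm', 'w', 'o', 's', 'p', 'e', 'r']
--
--     def classify(field):
--         for f in valid_flags:
--             if field.startswith(f + subfield_delim):
--                 return (f, field[len(f) + len(subfield_delim):])
--         return field
--
--     tokens = [classify(field) for field in text.split(field_delim)]
--
--     def is_barrier(t):
--         return isinstance(t, str) and t != ""
--
--     def emit_segment(seg):
--         # seg contains only empty literals and (flag, value) pairs
--         empties = [t for t in seg if isinstance(t, str)]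
--         pairs = [t for t in seg if not isinstance(t, str)]
--         order = []
--         for f, _ in pairs:
--             if f not in order:
--                 order.append(f)
--         groups = [f + subfield_delim + subfield_delim.join(v for g, v in pairs if g == f)
--                   for f in order]
--         return empties + groups
--
--     out = []
--     start = 0
--     n = len(tokens)
--     while True:
--         j = start
--         while j < n and not is_barrier(tokens[j]):
--             j += 1
--         out += emit_segment(tokens[start:j])
--         if j == n:
--             break
--         out.append(tokens[j])
--         start = j + 1
--     return field_delim.join(out)
-- ===== Notes on version B (the rewrite author's own statement) =====
-- stated objective: alternative
-- what changed: A is one stateful scan that grows a flag->values dict and flushes it at non-optional fields; B tokenizes the fields, cuts the token list into segments at non-empty literal (barrier) fields, and renders each segment independently by filtering (empties first, then one amalgam per flag in first-appearance order, values gathered by a per-flag filter), carrying no group state across the scan.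
-- outside the precondition, e.g. on amalgamate_optional_fields('a-1', '', '-'): A raises ValueError, B raises ValueError
import Mathlib
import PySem

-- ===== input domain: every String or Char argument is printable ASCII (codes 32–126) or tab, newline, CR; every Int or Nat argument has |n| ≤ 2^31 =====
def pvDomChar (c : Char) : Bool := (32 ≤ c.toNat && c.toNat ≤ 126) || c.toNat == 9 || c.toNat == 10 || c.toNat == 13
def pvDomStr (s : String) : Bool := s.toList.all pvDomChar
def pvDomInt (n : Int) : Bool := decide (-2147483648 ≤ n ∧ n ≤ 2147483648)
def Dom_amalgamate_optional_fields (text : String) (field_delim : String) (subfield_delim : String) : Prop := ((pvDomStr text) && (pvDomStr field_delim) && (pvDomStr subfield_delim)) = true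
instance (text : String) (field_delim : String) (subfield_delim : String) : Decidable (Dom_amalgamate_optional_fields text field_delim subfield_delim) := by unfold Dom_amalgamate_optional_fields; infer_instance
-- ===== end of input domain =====

-- B replaces A's stateful group-and-flush scan by a segment decomposition: tokenize, cut the
-- token list at non-empty literal fields, render each segment independently by filtering;
-- same return value, objective: alternative.

-- ===== PORT A =====
-- valid_flags, each flag as a one-character string (List Char)
def pvFlags : List (List Char) := [['a'], ['f'], ['m'], ['w'], ['o'], ['s'], ['p'], ['e'], ['r']]

-- A's inner 'for f in valid_flags: if field.startswith(f + subfield_delim): …' scan, first hit wins;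
-- field[len(f)+len(subfield_delim):] with a nonnegative start is List.drop
def pvFindFlagA (sd field : List Char) : List (List Char) → Option (List Char × List Char)
  | [] => none
  | f :: rest =>
      if PySem.Chars.startswith field (f ++ sd)
      then some (f, field.drop (f.length + sd.length))
      else pvFindFlagA sd field rest

-- flush: 'for f, values in grouped_fields.items(): result_fields.append(f + sd + sd.join(values))'
def pvFlushA (sd : List Char) (res : List (List Char)) (d : PySem.Dict (List Char) (List (List Char))) : List (List Char) :=
  d.items.foldl (fun r p => r ++ [p.1 ++ sd ++ PySem.Chars.join sd p.2]) res

-- one iteration of A's main 'for field in fields' loop, state = (grouped_fields, result_fields)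
def pvStepA (sd : List Char) (st : PySem.Dict (List Char) (List (List Char)) × List (List Char))
    (field : List Char) : PySem.Dict (List Char) (List (List Char)) × List (List Char) :=
  let (g, res) := st
  if field = [] then (g, res ++ [field])
  else
    match pvFindFlagA sd field pvFlags with
    | some (flag, value) =>
        let g1 := if g.contains flag then g else g.insert flag []   -- if flag not in grouped: grouped[flag] = []
        (g1.insert flag (g1.getD flag [] ++ [value]), res)          -- grouped[flag].append(value)
    | none =>
        (PySem.Dict.empty, pvFlushA sd res g ++ [field])            -- flush, clear, append field

def amalgamate_optional_fields (text : String) (field_delim : String) (subfield_delim : String) : String :=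
  if text = "" then text
  else
    match PySem.Str.split? text field_delim with
    | none => ""   -- field_delim = "": Python raises ValueError (excluded by Pre_)
    | some fields =>
        let sd := subfield_delim.toList
        let st := (fields.map String.toList).foldl (pvStepA sd) (PySem.Dict.empty, [])
        String.ofList (PySem.Chars.join field_delim.toList (pvFlushA sd st.2 st.1))

-- ===== PORT B =====
-- a token: .inl field (a literal kept as a str) or .inr (flag, value) (B's classify tuple)
abbrev pvTok : Type := (List Char) ⊕ (List Char × List Char)

-- B's classify: the same first-match flag scan, producing a token
def pvClassify (sd field : List Char) : List (List Char) → pvTok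
  | [] => .inl field
  | f :: rest =>
      if PySem.Chars.startswith field (f ++ sd)
      then .inr (f, field.drop (f.length + sd.length))
      else pvClassify sd field rest

-- is_barrier: a non-empty literal token
def pvIsBarrier (t : pvTok) : Bool :=
  match t with
  | .inl s => s ≠ []
  | .inr _ => false

def pvLit (t : pvTok) : List Char :=
  match t with
  | .inl s => s
  | .inr _ => []

-- emit_segment: empties in order, then one amalgam per flag in first-appearance order,
-- values gathered by filtering the segment's pairs
def pvEmitSeg (sd : List Char) (seg : List pvTok) : List (List Char) :=
  let empties := seg.filterMap (fun t => match t with | .inl s => some s | .inr _ => none)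
  let pairs := seg.filterMap (fun t => match t with | .inr p => some p | .inl _ => none)
  let order := pairs.foldl (fun acc p => if p.1 ∈ acc then acc else acc ++ [p.1]) []
  let groups := order.map (fun f =>
    f ++ sd ++ PySem.Chars.join sd (pairs.filterMap (fun q => if q.1 = f then some q.2 else none)))
  empties ++ groups

-- B's outer while-loop: split off the barrier-free prefix, emit it, then the barrier, repeat
def pvGo (sd : List Char) (toks : List pvTok) : List (List Char) :=
  match h : toks.dropWhile (fun t => !pvIsBarrier t) with
  | [] => pvEmitSeg sd (toks.takeWhile (fun t => !pvIsBarrier t))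
  | b :: rest =>
      pvEmitSeg sd (toks.takeWhile (fun t => !pvIsBarrier t)) ++ [pvLit b] ++ pvGo sd rest
termination_by toks.length
decreasing_by
  have hle := List.length_dropWhile_le (p := fun t => !pvIsBarrier t) (l := toks)
  rw [h] at hle
  simp at hle
  omega

def amalgamate_optional_fields_alt (text : String) (field_delim : String) (subfield_delim : String) : String :=
  if text = "" then text
  else
    match PySem.Str.split? text field_delim with
    | none => ""   -- field_delim = "": Python raises ValueError (excluded by Pre_)
    | some fields =>
        let sd := subfield_delim.toList
        let tokens := (fields.map String.toList).map (fun f => pvClassify sd f pvFlags)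
        String.ofList (PySem.Chars.join field_delim.toList (pvGo sd tokens))

-- ===== PRECONDITION & SPEC =====
-- Pre_ excludes only field_delim = "" with nonempty text, where Python's str.split raises ValueError
def Pre_amalgamate_optional_fields (text : String) (field_delim : String) (subfield_delim : String) : Prop :=
  text = "" ∨ field_delim ≠ ""
instance (text : String) (field_delim : String) (subfield_delim : String) : Decidable (Pre_amalgamate_optional_fields text field_delim subfield_delim) := by unfold Pre_amalgamate_optional_fields; infer_instance

def pvWitness_amalgamate_optional_fields : String × String × String := ("e-05_e-07_x", "_", "-")

def Spec_amalgamate_optional_fields (text : String) (field_delim : String) (subfield_delim : String) (out : String) : Prop := out = amalgamate_optional_fields_alt text field_delim subfield_delim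
instance (text : String) (field_delim : String) (subfield_delim : String) (out : String) : Decidable (Spec_amalgamate_optional_fields text field_delim subfield_delim out) := by unfold Spec_amalgamate_optional_fields; infer_instance

-- ===== CLAIM (what is proved, stated in full; the proofs are below) =====
def Claim_equal_amalgamate_optional_fields : Prop := ∀ (text : String) (field_delim : String) (subfield_delim : String), Dom_amalgamate_optional_fields text field_delim subfield_delim → Pre_amalgamate_optional_fields text field_delim subfield_delim → Spec_amalgamate_optional_fields text field_delim subfield_delim (amalgamate_optional_fields text field_delim subfield_delim)

-- ===== LEMMAS AND PROOFS =====

-- B's classify is A's flag scan, repackaged as a token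
theorem pvClassify_eq (sd field : List Char) (fl : List (List Char)) :
    pvClassify sd field fl =
      (match pvFindFlagA sd field fl with
       | some p => .inr p
       | none => .inl field) := by
  induction fl with
  | nil => rfl
  | cons f rest ih =>
      by_cases h : PySem.Chars.startswith field (f ++ sd) = true
      · simp [pvClassify, pvFindFlagA, h]
      · simp only [Bool.not_eq_true] at h
        simp [pvClassify, pvFindFlagA, h, ih]

-- the empty field matches no flag (every flag is a nonempty string)
theorem pvFindFlagA_nil (sd : List Char) (fl : List (List Char)) (hne : ∀ f ∈ fl, f ≠ []) :
    pvFindFlagA sd [] fl = none := by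
  induction fl with
  | nil => rfl
  | cons f rest ih =>
      have h : PySem.Chars.startswith [] (f ++ sd) ≠ true := by
        intro hs
        have := List.prefix_nil.mp ((PySem.Chars.startswith_iff [] (f ++ sd)).mp hs)
        exact hne f List.mem_cons_self (List.append_eq_nil_iff.mp this).1
      simp only [pvFindFlagA, if_neg h]
      exact ih (fun g hg => hne g (List.mem_cons_of_mem f hg))

-- A's step, written on tokens (proof-side only)
def pvStepT (sd : List Char) (st : PySem.Dict (List Char) (List (List Char)) × List (List Char))
    (t : pvTok) : PySem.Dict (List Char) (List (List Char)) × List (List Char) :=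
  match t with
  | .inr (flag, value) =>
      let g := st.1
      let g1 := if g.contains flag then g else g.insert flag []
      (g1.insert flag (g1.getD flag [] ++ [value]), st.2)
  | .inl s =>
      if s = [] then (st.1, st.2 ++ [s])
      else (PySem.Dict.empty, pvFlushA sd st.2 st.1 ++ [s])

theorem pvStepA_eq_stepT (sd field : List Char) (st) :
    pvStepA sd st field = pvStepT sd st (pvClassify sd field pvFlags) := by
  obtain ⟨g, res⟩ := st
  rw [pvClassify_eq]
  cases hscan : pvFindFlagA sd field pvFlags with
  | none =>
      by_cases hf : field = []
      · subst hf; simp [pvStepA, pvStepT]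
      · simp [pvStepA, pvStepT, hscan, hf]
  | some p =>
      obtain ⟨flag, value⟩ := p
      have hf : field ≠ [] := by
        intro hfe
        subst hfe
        rw [pvFindFlagA_nil sd pvFlags (by intro f hfm; fin_cases hfm <;> simp)] at hscan
        cases hscan
      simp [pvStepA, pvStepT, hscan, hf]

theorem pvFoldA_eq_foldT (sd : List Char) (fs : List (List Char)) (st) :
    fs.foldl (pvStepA sd) st =
      (fs.map (fun f => pvClassify sd f pvFlags)).foldl (pvStepT sd) st := by
  induction fs generalizing st with
  | nil => rfl
  | cons f t ih => simp only [List.foldl_cons, List.map_cons, pvStepA_eq_stepT, ih]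

-- ordered append-grouping (the reference form of A's dict building, proof-side)
def pvAddGroup (gs : List (List Char × List (List Char))) (flag value : List Char) :
    List (List Char × List (List Char)) :=
  match gs with
  | [] => [(flag, [value])]
  | (k, vs) :: t => if k = flag then (k, vs ++ [value]) :: t else (k, vs) :: pvAddGroup t flag value

def pvEmpties (seg : List pvTok) : List (List Char) :=
  seg.filterMap (fun t => match t with | .inl s => some s | .inr _ => none)

def pvPairs (seg : List pvTok) : List (List Char × List Char) :=
  seg.filterMap (fun t => match t with | .inr p => some p | .inl _ => none)

def pvOrder (ps : List (List Char × List Char)) : List (List Char) :=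
  ps.foldl (fun acc p => if p.1 ∈ acc then acc else acc ++ [p.1]) []

def pvVals (f : List Char) (ps : List (List Char × List Char)) : List (List Char) :=
  ps.filterMap (fun q => if q.1 = f then some q.2 else none)

theorem map_keep_of_not_key (gs : List (List Char × List (List Char))) (flag : List Char)
    (w : List Char × List (List Char)) (h : ∀ p ∈ gs, p.1 ≠ flag) :
    gs.map (fun p => if (p.1 == flag) = true then w else p) = gs := by
  induction gs with
  | nil => rfl
  | cons p t ih =>
      have h1 : ¬ ((p.1 == flag) = true) := by simp [h p List.mem_cons_self]
      rw [List.map_cons, if_neg h1, ih (fun q hq => h q (List.mem_cons_of_mem p hq))]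

theorem pvAddGroup_not_mem (gs : List (List Char × List (List Char))) (flag value : List Char)
    (h : ∀ p ∈ gs, p.1 ≠ flag) : pvAddGroup gs flag value = gs ++ [(flag, [value])] := by
  induction gs with
  | nil => rfl
  | cons p t ih =>
      obtain ⟨k, vs⟩ := p
      have h1 : k ≠ flag := h (k, vs) List.mem_cons_self
      simp only [pvAddGroup, if_neg h1, List.cons_append]
      rw [ih (fun q hq => h q (List.mem_cons_of_mem _ hq))]

theorem pvAddGroup_eq_map (gs : List (List Char × List (List Char))) (flag value : List Char)
    (vs : List (List Char)) (hnd : (gs.map Prod.fst).Nodup) (hmem : (flag, vs) ∈ gs) :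
    gs.map (fun p => if (p.1 == flag) = true then (flag, vs ++ [value]) else p) =
      pvAddGroup gs flag value := by
  induction gs with
  | nil => cases hmem
  | cons p t ih =>
      obtain ⟨k, ws⟩ := p
      simp only [List.map_cons, List.nodup_cons] at hnd
      by_cases hk : k = flag
      · subst hk
        have hvs : vs = ws := by
          rcases List.mem_cons.mp hmem with h | h
          · exact congrArg Prod.snd h
          · exact absurd (List.mem_map.mpr ⟨(k, vs), h, rfl⟩) hnd.1
        subst hvs
        simp only [pvAddGroup, List.map_cons]
        rw [map_keep_of_not_key t k ((k, vs ++ [value]))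
          (fun q hq hqk => hnd.1 (List.mem_map.mpr ⟨q, hq, hqk⟩))]
        simp
      · have hmem' : (flag, vs) ∈ t := by
          rcases List.mem_cons.mp hmem with h | h
          · exact absurd (congrArg Prod.fst h).symm hk
          · exact h
        simp only [pvAddGroup, List.map_cons, beq_iff_eq, if_neg hk]
        rw [← ih hnd.2 hmem']
        simp

-- one non-barrier token of A's loop = the pvAddGroup update on items (empties pass through)
theorem pvStepT_nonbarrier (sd : List Char) (d : PySem.Dict (List Char) (List (List Char)))
    (gs : List (List Char × List (List Char))) (res : List (List Char)) (t : pvTok)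
    (hb : pvIsBarrier t = false) (h : d.items = gs) (hnd : d.keys.Nodup) :
    (pvStepT sd (d, res) t).1.items =
      (match t with | .inr p => pvAddGroup gs p.1 p.2 | .inl _ => gs) ∧
    (pvStepT sd (d, res) t).1.keys.Nodup ∧
    (pvStepT sd (d, res) t).2 = res ++ (match t with | .inl s => [s] | .inr _ => []) := by
  cases t with
  | inl s =>
      have hs : s = [] := by
        by_contra hne
        simp [pvIsBarrier, hne] at hb
      subst hs
      simp [pvStepT, h, hnd]
  | inr p =>
      obtain ⟨flag, value⟩ := p
      have hkeys : d.keys = gs.map Prod.fst := by simp [PySem.Dict.keys, h]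
      by_cases hc : d.contains flag = true
      · have hmemk : flag ∈ d.keys := (PySem.Dict.contains_iff_mem_keys d flag).mp hc
        obtain ⟨q, hpm, hpk⟩ := List.mem_map.mp (hkeys ▸ hmemk)
        have hq : (flag, q.2) ∈ gs := by rw [← hpk]; exact hpm
        have hgd : d.getD flag [] = q.2 := PySem.Dict.getD_of_mem_items d (h ▸ hq) hnd []
        simp only [pvStepT, if_pos hc]
        refine ⟨?_, ?_, by simp⟩
        · rw [PySem.Dict.items_insert_of_contains d _ hc, hgd, h]
          exact pvAddGroup_eq_map gs flag value q.2 (hkeys ▸ hnd) hq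
        · exact PySem.Dict.nodup_keys_insert d flag _ hnd
      · have hc' : d.contains flag = false := by
          cases hcc : d.contains flag
          · rfl
          · exact absurd hcc hc
        have hnk : ∀ p ∈ gs, p.1 ≠ flag := by
          intro p hp hpk
          exact hc ((PySem.Dict.contains_iff_mem_keys d flag).mpr
            (hkeys ▸ List.mem_map.mpr ⟨p, hp, hpk⟩))
        simp only [pvStepT, if_neg hc]
        have hce : (d.insert flag []).contains flag = true :=
          PySem.Dict.contains_insert_self d flag []
        have hgd : (d.insert flag []).getD flag [] = [] :=
          PySem.Dict.getD_insert_self d flag [] []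
        refine ⟨?_, ?_, by simp⟩
        · rw [PySem.Dict.items_insert_of_contains _ _ hce, hgd,
            PySem.Dict.items_insert_of_not_contains d _ hc', h, List.map_append,
            map_keep_of_not_key gs flag _ hnk, pvAddGroup_not_mem gs flag value hnk]
          simp
        · exact PySem.Dict.nodup_keys_insert _ flag _
            (PySem.Dict.nodup_keys_insert d flag _ hnd)

-- A's loop over a barrier-free segment: dict items grow by pvAddGroup over the pairs,
-- result grows by the empties
theorem pvFoldT_segment (sd : List Char) (seg : List pvTok)
    (hb : ∀ t ∈ seg, pvIsBarrier t = false) :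
    ∀ (d : PySem.Dict (List Char) (List (List Char))) (gs : List (List Char × List (List Char)))
      (res : List (List Char)), d.items = gs → d.keys.Nodup →
    (seg.foldl (pvStepT sd) (d, res)).1.items =
      (pvPairs seg).foldl (fun g p => pvAddGroup g p.1 p.2) gs ∧
    (seg.foldl (pvStepT sd) (d, res)).1.keys.Nodup ∧
    (seg.foldl (pvStepT sd) (d, res)).2 = res ++ pvEmpties seg := by
  induction seg with
  | nil => intro d gs res h hnd; simp [pvPairs, pvEmpties, h, hnd]
  | cons t rest ih =>
      intro d gs res h hnd
      have hbt := hb t List.mem_cons_self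
      have hstep := pvStepT_nonbarrier sd d gs res t hbt h hnd
      rcases hA : pvStepT sd (d, res) t with ⟨d1, res1⟩
      rw [hA] at hstep
      obtain ⟨h1, h2, h3⟩ := hstep
      simp only at h1 h2 h3
      have ihr := ih (fun u hu => hb u (List.mem_cons_of_mem t hu)) d1 _ res1 h1 h2
      simp only [List.foldl_cons, hA]
      cases t with
      | inl s =>
          have hs : s = [] := by
            by_contra hne; simp [pvIsBarrier, hne] at hbt
          subst hs
          refine ⟨ihr.1, ihr.2.1, ?_⟩
          rw [ihr.2.2, h3]
          simp [pvEmpties]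
      | inr p =>
          refine ⟨by simpa [pvPairs] using ihr.1, ihr.2.1, ?_⟩
          rw [ihr.2.2, h3]
          simp [pvEmpties]

-- membership in pvOrder's accumulator
theorem pvOrder_acc_mem (ps : List (List Char × List Char)) :
    ∀ (acc : List (List Char)) (x : List Char),
      (x ∈ ps.foldl (fun acc p => if p.1 ∈ acc then acc else acc ++ [p.1]) acc ↔
        x ∈ acc ∨ x ∈ ps.map Prod.fst) := by
  induction ps with
  | nil => intro acc x; simp
  | cons p t ih =>
      intro acc x
      by_cases hp : p.1 ∈ acc
      · simp only [List.foldl_cons, if_pos hp]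
        rw [ih]
        constructor
        · rintro (h | h)
          · exact Or.inl h
          · exact Or.inr (by simp [h])
        · rintro (h | h)
          · exact Or.inl h
          · rcases List.mem_map.mp h with ⟨q, hq, hqx⟩
            rcases List.mem_cons.mp hq with rfl | hq'
            · exact Or.inl (hqx ▸ hp)
            · exact Or.inr (List.mem_map.mpr ⟨q, hq', hqx⟩)
      · simp only [List.foldl_cons, if_neg hp]
        rw [ih]
        simp only [List.mem_append, List.map_cons, List.mem_cons]
        tauto

theorem pvOrder_acc_nodup (ps : List (List Char × List Char)) :
    ∀ (acc : List (List Char)), acc.Nodup →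
      (ps.foldl (fun acc p => if p.1 ∈ acc then acc else acc ++ [p.1]) acc).Nodup := by
  induction ps with
  | nil => intro acc h; exact h
  | cons p t ih =>
      intro acc h
      by_cases hp : p.1 ∈ acc
      · simp only [List.foldl_cons, if_pos hp]; exact ih acc h
      · simp only [List.foldl_cons, if_neg hp]
        exact ih _ (by
          simp only [List.nodup_append, List.nodup_singleton, true_and]
          exact ⟨h, by simpa using fun a ha he => hp (by rw [← he]; exact ha)⟩)

theorem pvOrder_mem (ps : List (List Char × List Char)) (x : List Char) :
    x ∈ pvOrder ps ↔ x ∈ ps.map Prod.fst := by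
  unfold pvOrder
  rw [pvOrder_acc_mem]
  simp

theorem pvOrder_nodup (ps : List (List Char × List Char)) : (pvOrder ps).Nodup :=
  pvOrder_acc_nodup ps [] List.nodup_nil

theorem pvOrder_append (ps : List (List Char × List Char)) (p : List Char × List Char) :
    pvOrder (ps ++ [p]) =
      if p.1 ∈ pvOrder ps then pvOrder ps else pvOrder ps ++ [p.1] := by
  unfold pvOrder
  rw [List.foldl_append]
  rfl

theorem pvVals_append (f : List Char) (ps : List (List Char × List Char))
    (p : List Char × List Char) :
    pvVals f (ps ++ [p]) = pvVals f ps ++ (if p.1 = f then [p.2] else []) := by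
  unfold pvVals
  rw [List.filterMap_append]
  by_cases h : p.1 = f <;> simp [h]

theorem pvVals_nil_of_not_mem (f : List Char) (ps : List (List Char × List Char))
    (h : f ∉ ps.map Prod.fst) : pvVals f ps = [] := by
  induction ps with
  | nil => rfl
  | cons p t ih =>
      simp only [List.map_cons, List.mem_cons, not_or] at h
      unfold pvVals
      simp only [List.filterMap_cons]
      rw [if_neg (fun he => h.1 he.symm)]
      exact ih h.2

-- appending a value to an existing key, on the map form
theorem pvAddGroup_map_mem (o : List (List Char)) (V : List Char → List (List Char))
    (f v : List Char) (hnd : o.Nodup) (hf : f ∈ o) :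
    pvAddGroup (o.map (fun g => (g, V g))) f v =
      o.map (fun g => (g, V g ++ if g = f then [v] else [])) := by
  induction o with
  | nil => cases hf
  | cons k t ih =>
      simp only [List.nodup_cons] at hnd
      by_cases hk : k = f
      · subst hk
        simp only [List.map_cons, pvAddGroup, if_pos trivial]
        refine congrArg₂ _ (by simp) ?_
        refine (List.map_congr_left ?_).symm
        intro g hg
        have : g ≠ k := fun he => hnd.1 (he ▸ hg)
        simp [this]
      · have hf' : f ∈ t := by
          rcases List.mem_cons.mp hf with h | h
          · exact absurd h.symm hk
          · exact h
        simp only [List.map_cons, pvAddGroup, if_neg hk]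
        rw [ih hnd.2 hf']
        simp

-- the grouping characterization: A's incremental grouping = first-appearance order + filtering
theorem pvGroupBy_char (ps : List (List Char × List Char)) :
    ps.foldl (fun g p => pvAddGroup g p.1 p.2) [] =
      (pvOrder ps).map (fun f => (f, pvVals f ps)) := by
  induction ps using List.reverseRecOn with
  | nil => rfl
  | append_singleton ps p ih =>
      rw [List.foldl_append, List.foldl_cons, List.foldl_nil, ih, pvOrder_append]
      by_cases hp : p.1 ∈ pvOrder ps
      · rw [if_pos hp, pvAddGroup_map_mem _ _ _ _ (pvOrder_nodup ps) hp]
        refine List.map_congr_left ?_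
        intro g _
        rw [pvVals_append]
        by_cases hg : g = p.1
        · simp [hg]
        · have h2 : p.1 ≠ g := fun h => hg h.symm
          simp [hg, h2]
      · rw [if_neg hp]
        have hnk : ∀ q ∈ (pvOrder ps).map (fun f => (f, pvVals f ps)), q.1 ≠ p.1 := by
          intro q hq hq1
          rcases List.mem_map.mp hq with ⟨g, hg, rfl⟩
          exact hp (hq1 ▸ hg)
        rw [pvAddGroup_not_mem _ _ _ hnk, List.map_append]
        congr 1
        · refine List.map_congr_left ?_
          intro g hg
          rw [pvVals_append]
          have : p.1 ≠ g := fun h => hp (h ▸ hg)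
          simp [this]
        · have hnm : p.1 ∉ ps.map Prod.fst := fun h => hp ((pvOrder_mem ps p.1).mpr h)
          simp [pvVals_append, pvVals_nil_of_not_mem _ _ hnm]

-- flushing A's dict after a barrier-free segment yields exactly B's emit_segment groups
theorem pvFlush_segment (sd : List Char) (seg : List pvTok)
    (hb : ∀ t ∈ seg, pvIsBarrier t = false) (res : List (List Char)) :
    (pvFlushA sd (seg.foldl (pvStepT sd) (PySem.Dict.empty, res)).2
        (seg.foldl (pvStepT sd) (PySem.Dict.empty, res)).1 =
      res ++ pvEmitSeg sd seg) ∧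
    (seg.foldl (pvStepT sd) (PySem.Dict.empty, res)).1.items =
      (pvOrder (pvPairs seg)).map (fun f => (f, pvVals f (pvPairs seg))) := by
  obtain ⟨h1, _, h3⟩ := pvFoldT_segment sd seg hb PySem.Dict.empty [] res rfl
    PySem.Dict.nodup_keys_empty
  have hitems : (seg.foldl (pvStepT sd) (PySem.Dict.empty, res)).1.items =
      (pvOrder (pvPairs seg)).map (fun f => (f, pvVals f (pvPairs seg))) := by
    rw [h1, pvGroupBy_char]
  refine ⟨?_, hitems⟩
  unfold pvFlushA
  rw [hitems, h3, PySem.List.foldl_append_singleton_eq_map]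
  unfold pvEmitSeg pvEmpties pvPairs pvVals pvOrder
  simp [List.map_map, Function.comp_def]

-- a helper: head of dropWhile fails the predicate
theorem dropWhile_head_false {α : Type} (p : α → Bool) (l : List α) (b : α) (rest : List α)
    (h : l.dropWhile p = b :: rest) : p b = false := by
  induction l with
  | nil => cases h
  | cons x t ih =>
      by_cases hx : p x = true
      · rw [List.dropWhile_cons_of_pos hx] at h
        exact ih h
      · rw [List.dropWhile_cons_of_neg hx] at h
        cases h
        simpa using hx

-- main: A's token fold (starting from an empty dict), flushed, equals B's segment recursion
theorem pvMain (sd : List Char) : ∀ (n : ℕ) (toks : List pvTok), toks.length ≤ n →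
    ∀ (res : List (List Char)),
    pvFlushA sd (toks.foldl (pvStepT sd) (PySem.Dict.empty, res)).2
        (toks.foldl (pvStepT sd) (PySem.Dict.empty, res)).1 =
      res ++ pvGo sd toks := by
  intro n
  induction n with
  | zero =>
      intro toks hlen res
      have : toks = [] := List.length_eq_zero_iff.mp (Nat.le_zero.mp hlen)
      subst this
      rw [pvGo]
      simp only [List.dropWhile_nil]
      exact (pvFlush_segment sd [] (by simp) res).1
  | succ m ih =>
      intro toks hlen res
      have hsplit : toks.takeWhile (fun t => !pvIsBarrier t) ++
          toks.dropWhile (fun t => !pvIsBarrier t) = toks := List.takeWhile_append_dropWhile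
      have hpre : ∀ t ∈ toks.takeWhile (fun t => !pvIsBarrier t), pvIsBarrier t = false := by
        intro t ht
        have := List.mem_takeWhile_imp ht
        simpa using this
      rw [pvGo]
      cases hrest : toks.dropWhile (fun t => !pvIsBarrier t) with
      | nil =>
          have htk := hsplit
          rw [hrest, List.append_nil] at htk
          have hmain := (pvFlush_segment sd (toks.takeWhile (fun t => !pvIsBarrier t)) hpre res).1
          conv_lhs => rw [← htk]
          exact hmain
      | cons b rest =>
          have hbb : pvIsBarrier b = true := by
            have := dropWhile_head_false (fun t => !pvIsBarrier t) toks b rest hrest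
            simpa using this
          obtain ⟨s, hs, hsne⟩ : ∃ s, b = .inl s ∧ s ≠ [] := by
            cases b with
            | inl s =>
                refine ⟨s, rfl, ?_⟩
                by_contra he
                subst he
                simp [pvIsBarrier] at hbb
            | inr p => simp [pvIsBarrier] at hbb
          subst hs
          have hlen' : rest.length ≤ m := by
            have hle := List.length_dropWhile_le (p := fun t => !pvIsBarrier t) (l := toks)
            rw [hrest] at hle
            simp only [List.length_cons] at hle
            omega
          conv_lhs => rw [← hsplit, hrest]
          rw [List.foldl_append, List.foldl_cons]
          rcases hA : (toks.takeWhile (fun t => !pvIsBarrier t)).foldl (pvStepT sd)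
              (PySem.Dict.empty, res) with ⟨d1, res1⟩
          have hseg := pvFlush_segment sd (toks.takeWhile (fun t => !pvIsBarrier t)) hpre res
          rw [hA] at hseg
          simp only at hseg
          -- the barrier step flushes and clears
          have hstep : pvStepT sd (d1, res1) (.inl s) =
              (PySem.Dict.empty, pvFlushA sd res1 d1 ++ [s]) := by
            simp [pvStepT, hsne]
          rw [hstep, ih rest hlen' _]
          rw [hseg.1]
          simp [pvLit]

-- ===== VERDICT (by name: the statement is the Claim_ definition above) =====
theorem amalgamate_optional_fields_spec : Claim_equal_amalgamate_optional_fields := by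
  intro text field_delim subfield_delim _ _
  unfold Spec_amalgamate_optional_fields amalgamate_optional_fields amalgamate_optional_fields_alt
  by_cases ht : text = ""
  · simp [ht]
  · simp only [if_neg ht]
    cases hsplit : PySem.Str.split? text field_delim with
    | none => rfl
    | some fields =>
        dsimp only
        have := pvMain subfield_delim.toList
          ((fields.map String.toList).map (fun f => pvClassify subfield_delim.toList f pvFlags)).length
          ((fields.map String.toList).map (fun f => pvClassify subfield_delim.toList f pvFlags))
          le_rfl []
        simp only [List.nil_append] at this
        rw [pvFoldA_eq_foldT, this]
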